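-- pv_equiv track=rewrite | github.com/codemicro/adventOfCode | challenges/2023/12-hotSprings/main.py | check_broken_length_constraints
-- ===== SOURCE A (Python) =====
-- from typing import Generator, Iterable
--
-- def check_broken_length_constraints(x: Iterable[str], counts: list[int]) -> bool:
--     inside_set = False
--     set_length = 0
--     current_count = 0
--     for i in range((lx := len(x))+1):
--         char = x[i] if i < lx else "-"
--         if char == "#":
--             inside_set = True
--             set_length += 1
--         elif inside_set:
--             inside_set = False
--             try:
--                 if set_length != counts[current_count]:
--                     return False
--             except IndexError:
--                 # too many counts exist
--                 return False
--             set_length = 0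
--             current_count += 1
--     return current_count == len(counts)
-- ===== SOURCE B (Python) =====
-- def check_broken_length_constraints(x, counts):
--     # Two-phase: extract the list of contiguous "#"-run lengths, then compare.
--     runs = []
--     run = 0
--     for i in range(len(x)):  # keep len()/indexing so non-sized inputs raise TypeError like A
--         if x[i] == "#":
--             run += 1
--         elif run:
--             runs.append(run)
--             run = 0
--     if run:
--         runs.append(run)
--     return runs == counts
-- ===== Notes on version B (the rewrite author's own statement) =====
-- stated objective: simpler
-- what changed: Replaces A's interleaved scan-compare-early-exit state machine (inside_set/set_length/current_count with try/except IndexError) with a two-phase shape: collect all contiguous '#'-run lengths, then return a single list equality against counts.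
import Mathlib
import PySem

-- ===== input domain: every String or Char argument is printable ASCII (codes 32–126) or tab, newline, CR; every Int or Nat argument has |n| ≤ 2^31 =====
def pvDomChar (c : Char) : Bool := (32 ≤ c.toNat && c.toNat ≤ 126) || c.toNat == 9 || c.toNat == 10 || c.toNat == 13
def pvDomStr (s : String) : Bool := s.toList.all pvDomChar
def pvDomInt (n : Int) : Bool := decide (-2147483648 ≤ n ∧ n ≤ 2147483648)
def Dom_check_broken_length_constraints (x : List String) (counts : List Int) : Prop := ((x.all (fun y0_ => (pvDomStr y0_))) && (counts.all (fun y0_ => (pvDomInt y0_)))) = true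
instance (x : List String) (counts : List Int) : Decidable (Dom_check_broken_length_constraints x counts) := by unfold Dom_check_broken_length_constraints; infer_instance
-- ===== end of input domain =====

-- B replaces A's interleaved scan-and-compare state machine with a two-phase
-- "collect all '#'-run lengths, then one list equality" (objective: simpler).

-- ===== PORT A =====
-- the for-loop of A: remaining indices, inside_set, set_length, current_count
def pvAGo (x : List String) (counts : List Int) (lx : Int) :
    List Int → Bool → Int → Int → Bool
  | [], _, _, cur => decide (cur = (counts.length : Int))
  | i :: rest, inside, setLen, cur =>
    let char := if i < lx then (PySem.List.pyGet? x i).getD "-" else "-"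
    if char == "#" then pvAGo x counts lx rest true (setLen + 1) cur
    else if inside then
      match PySem.List.pyGet? counts cur with
      | none => false
      | some c =>
        if setLen ≠ c then false
        else pvAGo x counts lx rest false 0 (cur + 1)
    else pvAGo x counts lx rest inside setLen cur

def check_broken_length_constraints (x : List String) (counts : List Int) : Bool :=
  pvAGo x counts (x.length : Int)
    (PySem.List.pyRange 0 ((x.length : Int) + 1) 1) false 0 0

-- ===== PORT B =====
-- run-length extraction of Source B: current run carried, flushed when it ends
def pvRuns : List String → Int → List Int
  | [], run => if run ≠ 0 then [run] else []
  | ch :: rest, run =>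
    if ch == "#" then pvRuns rest (run + 1)
    else if run ≠ 0 then run :: pvRuns rest 0
    else pvRuns rest 0

def check_broken_length_constraints_alt (x : List String) (counts : List Int) : Bool :=
  decide (pvRuns x 0 = counts)

-- ===== PRECONDITION & SPEC =====
def Spec_check_broken_length_constraints (x : List String) (counts : List Int) (out : Bool) : Prop := out = check_broken_length_constraints_alt x counts
instance (x : List String) (counts : List Int) (out : Bool) : Decidable (Spec_check_broken_length_constraints x counts out) := by unfold Spec_check_broken_length_constraints; infer_instance

-- ===== CLAIM (what is proved, stated in full; the proofs are below) =====
def Claim_equal_check_broken_length_constraints : Prop := ∀ (x : List String) (counts : List Int), Dom_check_broken_length_constraints x counts → Spec_check_broken_length_constraints x counts (check_broken_length_constraints x counts)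

-- ===== LEMMAS AND PROOFS =====

-- character-level version of A's loop (chars ++ ["-"] is what A's indexing scans)
def pvAC (counts : List Int) : List String → Bool → Int → Int → Bool
  | [], _, _, cur => decide (cur = (counts.length : Int))
  | ch :: rest, inside, setLen, cur =>
    if ch == "#" then pvAC counts rest true (setLen + 1) cur
    else if inside then
      match PySem.List.pyGet? counts cur with
      | none => false
      | some c =>
        if setLen ≠ c then false
        else pvAC counts rest false 0 (cur + 1)
    else pvAC counts rest inside setLen cur

-- A's index loop from position k equals the char loop over x.drop k ++ ["-"]
theorem pvAGo_eq_pvAC (x : List String) (counts : List Int) :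
    ∀ (k : Nat), k ≤ x.length → ∀ (inside : Bool) (setLen cur : Int),
    pvAGo x counts (x.length : Int)
      (PySem.List.pyRange (k : Int) ((x.length : Int) + 1) 1) inside setLen cur
      = pvAC counts (x.drop k ++ ["-"]) inside setLen cur := by
  intro k hk
  induction hn : x.length - k generalizing k with
  | zero =>
    intro inside setLen cur
    have hkx : k = x.length := by omega
    subst hkx
    rw [PySem.List.pyRange_one_cons (by omega),
        PySem.List.pyRange_one_eq_nil (by omega)]
    simp [pvAGo, pvAC]
  | succ n ih =>
    intro inside setLen cur
    have hklt : k < x.length := by omega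
    rw [PySem.List.pyRange_one_cons (by push_cast; omega)]
    have hget : PySem.List.pyGet? x (k : Int) = some x[k] := by
      simp [PySem.List.pyGet?_natCast, List.getElem?_eq_getElem hklt]
    have hdrop : x.drop k = x[k] :: x.drop (k + 1) :=
      (List.getElem_cons_drop hklt).symm
    have IH : ∀ (inside : Bool) (setLen cur : Int),
        pvAGo x counts (x.length : Int)
          (PySem.List.pyRange ((k : Int) + 1) ((x.length : Int) + 1) 1) inside setLen cur
          = pvAC counts (x.drop (k + 1) ++ ["-"]) inside setLen cur := by
      intro a b c
      rw [show ((k : Int) + 1) = ((k + 1 : Nat) : Int) by push_cast; ring]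
      exact ih (k + 1) (by omega) (by omega) a b c
    simp only [pvAGo, hget, hdrop]
    have hlt : ((k : Int)) < (x.length : Int) := by exact_mod_cast hklt
    simp only [if_pos hlt, Option.getD_some, List.cons_append, pvAC]
    by_cases h1 : x[k] == "#"
    · simp [h1, IH]
    · cases inside with
      | false => simp [h1, IH]
      | true =>
        rcases hget : PySem.List.pyGet? counts cur with _ | c
        · simp [h1, hget]
        · by_cases h2 : setLen = c
          · simp [h1, h2, IH]
          · simp [h1, h2]

-- the char loop is the "remaining runs = remaining counts" test
theorem pvAC_eq_runs (counts : List Int) :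
    ∀ (chars : List String) (setLen cur : Int), 0 ≤ setLen → 0 ≤ cur →
    cur ≤ (counts.length : Int) →
    pvAC counts (chars ++ ["-"]) (decide (setLen ≠ 0)) setLen cur
      = decide (pvRuns chars setLen = counts.drop cur.toNat) := by
  intro chars
  induction chars with
  | nil =>
    intro setLen cur hs hc hcl
    rw [List.nil_append]
    by_cases hz : setLen = 0
    · subst hz
      have hL : pvAC counts ["-"] (decide ((0:Int) ≠ 0)) 0 cur
          = decide (cur = (counts.length : Int)) := by simp [pvAC]
      rw [hL, show pvRuns [] (0:Int) = [] from by simp [pvRuns], decide_eq_decide]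
      constructor
      · intro h; symm; rw [List.drop_eq_nil_iff]; omega
      · intro h; have := List.drop_eq_nil_iff.1 h.symm; omega
    · rcases hget : PySem.List.pyGet? counts cur with _ | c
      · have hlen : (counts.length : Int) ≤ cur := by
          rw [PySem.List.pyGet?_eq_none_iff] at hget
          simp [PySem.Raise.InRange] at hget
          omega
        have hdr : counts.drop cur.toNat = [] := List.drop_eq_nil_iff.2 (by omega)
        simp [pvAC, pvRuns, hz, hget, hdr]
      · have hcur : cur.toNat < counts.length := by
          by_contra h
          rw [PySem.List.pyGet?_of_nonneg counts hc, List.getElem?_eq_none (by omega)] at hget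
          simp at hget
        have hcval : c = counts[cur.toNat] := by
          rw [PySem.List.pyGet?_of_nonneg counts hc, List.getElem?_eq_getElem hcur] at hget
          exact (Option.some.inj hget).symm
        have hdrop : counts.drop cur.toNat = counts[cur.toNat] :: counts.drop (cur.toNat + 1) :=
          (List.getElem_cons_drop hcur).symm
        by_cases h2 : setLen = c
        · rw [hdrop, ← hcval, ← h2]
          simp only [pvAC, pvRuns, hz, ne_eq, not_false_eq_true, decide_true,
            if_true, ite_true, hget]
          simp only [h2, hcval] at hz ⊢
          simp only [ne_eq, not_true_eq_false, if_false, ite_false, pvAC,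
            Bool.false_eq_true, if_neg, decide_eq_decide]
          rw [if_neg (by decide), decide_eq_decide]
          constructor
          · intro h
            have : counts.drop (cur.toNat + 1) = [] := List.drop_eq_nil_iff.2 (by omega)
            simp [this]
          · intro h
            have h3 := (List.cons.inj h).2
            have := List.drop_eq_nil_iff.1 h3.symm
            omega
        · rw [hdrop, ← hcval]
          simp [pvAC, pvRuns, hz, hget, h2]
  | cons ch rest ih =>
    intro setLen cur hs hc hcl
    rw [List.cons_append]
    by_cases h1 : ch == "#"
    · have IH := ih (setLen + 1) cur (by omega) hc hcl
      rw [show (decide (setLen + 1 ≠ 0)) = true from by simp; omega] at IH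
      simp only [pvAC, pvRuns, h1, if_pos, ite_true]
      exact IH
    · by_cases hz : setLen = 0
      · subst hz
        have IH := ih 0 cur le_rfl hc hcl
        simp only [ne_eq, not_true_eq_false, decide_false] at IH ⊢
        simp only [pvAC, pvRuns, h1, Bool.false_eq_true, if_false, ite_false]
        exact IH
      · rcases hget : PySem.List.pyGet? counts cur with _ | c
        · have hlen : (counts.length : Int) ≤ cur := by
            rw [PySem.List.pyGet?_eq_none_iff] at hget
            simp [PySem.Raise.InRange] at hget
            omega
          have hdr : counts.drop cur.toNat = [] := List.drop_eq_nil_iff.2 (by omega)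
          simp [pvAC, pvRuns, hz, h1, hget, hdr]
        · have hcur : cur.toNat < counts.length := by
            by_contra h
            rw [PySem.List.pyGet?_of_nonneg counts hc, List.getElem?_eq_none (by omega)] at hget
            simp at hget
          have hcval : c = counts[cur.toNat] := by
            rw [PySem.List.pyGet?_of_nonneg counts hc, List.getElem?_eq_getElem hcur] at hget
            exact (Option.some.inj hget).symm
          have hdrop : counts.drop cur.toNat = counts[cur.toNat] :: counts.drop (cur.toNat + 1) :=
            (List.getElem_cons_drop hcur).symm
          by_cases h2 : setLen = c
          · have IH := ih 0 (cur + 1) le_rfl (by omega) (by omega)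
            rw [show (cur + 1).toNat = cur.toNat + 1 from by omega] at IH
            simp only [ne_eq, not_true_eq_false, decide_false] at IH
            rw [hdrop, ← hcval, ← h2]
            simp only [pvAC, pvRuns, hz, ne_eq, not_false_eq_true, decide_true,
              if_true, ite_true, h1, Bool.false_eq_true, if_false, ite_false, hget,
              not_true_eq_false, IH, decide_eq_decide]
            simp [h2]
          · rw [hdrop, ← hcval]
            simp [pvAC, pvRuns, hz, h1, hget, h2]

-- ===== VERDICT (by name: the statement is the Claim_ definition above) =====
theorem check_broken_length_constraints_spec : Claim_equal_check_broken_length_constraints := by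
  intro x counts _
  unfold Spec_check_broken_length_constraints check_broken_length_constraints
    check_broken_length_constraints_alt
  have h0 := pvAGo_eq_pvAC x counts 0 (Nat.zero_le _) false 0 0
  simp only [Nat.cast_zero, List.drop_zero] at h0
  rw [h0]
  have h1 := pvAC_eq_runs counts x 0 0 le_rfl le_rfl (by exact_mod_cast Nat.zero_le _)
  simpa using h1
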